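-- pv_equiv track=rewrite | github.com/AtticusThacker/draw-all-graphs | src/GraphsOptimized.py | classify_by_edges
-- ===== SOURCE A (Python) =====
-- def generate_sums(nums):
--     def generate_combinations(index, curr_sum):
--         if index == len(nums):
--             sums.append(curr_sum)
--             return
--
--         generate_combinations(index + 1, curr_sum + nums[index])  # Include current number
--         generate_combinations(index + 1, curr_sum)  # Exclude current number
--
--     sums = []
--     generate_combinations(0, 0)
--     return sums
--
-- def classify_by_edges(cycle_lengths, c):
--     totals = []
--     counts = {}
--     for x in cycle_lengths:
--         totals.extend(generate_sums(x))
--     for y in range(max(totals) + 1):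
--         counts[y] = totals.count(y) // c
--     return counts
-- ===== SOURCE B (Python) =====
-- def classify_by_edges(cycle_lengths, c):
--     counter = {}
--     for nums in cycle_lengths:
--         dp = {0: 1}
--         for v in nums:
--             ndp = {}
--             for s, k in dp.items():
--                 ndp[s] = ndp.get(s, 0) + k
--                 ndp[s + v] = ndp.get(s + v, 0) + k
--             dp = ndp
--         for s, k in dp.items():
--             counter[s] = counter.get(s, 0) + k
--     m = max(sum(v for v in nums if v > 0) for nums in cycle_lengths)
--     return {y: counter.get(y, 0) // c for y in range(m + 1)}
-- ===== Notes on version B (the rewrite author's own statement) =====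
-- stated objective: faster
-- what changed: B replaces A's explicit enumeration of all 2^n subset sums per list and the per-value totals.count scan over the whole sums list by a per-list subset-sum counting dictionary (DP merging equal sums) folded into one histogram, with a single O(1) lookup per output key.
import Mathlib
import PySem

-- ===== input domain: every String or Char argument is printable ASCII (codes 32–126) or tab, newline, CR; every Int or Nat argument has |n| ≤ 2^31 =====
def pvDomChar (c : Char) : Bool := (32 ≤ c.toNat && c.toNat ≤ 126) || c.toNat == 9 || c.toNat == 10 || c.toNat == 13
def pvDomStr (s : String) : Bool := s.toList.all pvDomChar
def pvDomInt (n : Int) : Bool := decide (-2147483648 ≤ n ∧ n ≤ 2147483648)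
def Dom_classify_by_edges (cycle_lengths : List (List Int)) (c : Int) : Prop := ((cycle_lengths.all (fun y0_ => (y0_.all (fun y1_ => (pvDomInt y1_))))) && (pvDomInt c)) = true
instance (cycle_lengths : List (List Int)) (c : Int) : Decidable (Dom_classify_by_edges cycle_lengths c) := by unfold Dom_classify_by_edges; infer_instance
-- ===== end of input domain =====

-- B replaces A's exponential subset enumeration plus a per-value rescan of all sums
-- (totals.count(y) for every y) by a per-list subset-sum counting dictionary merged into
-- one histogram, then a single lookup per output key (objective: faster).

-- ===== PORT A =====
-- generate_combinations(index, curr_sum): recursion on the suffix nums[index:] with the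
-- same state curr_sum; the include branch is explored first, exactly as in the Python.
def genComb : List Int → Int → List Int
  | [], curr => [curr]
  | v :: rest, curr => genComb rest (curr + v) ++ genComb rest curr

def generate_sums (nums : List Int) : List Int := genComb nums 0

def classify_by_edges (cycle_lengths : List (List Int)) (c : Int) : List (Int × Int) :=
  let totals := cycle_lengths.foldl (fun acc x => acc ++ generate_sums x) []
  match PySem.List.max? totals (fun y => y) with
  | none => []   -- Python: max([]) raises ValueError; excluded by Pre_
  | some m =>
    let counts := (PySem.List.pyRange 0 (m + 1) 1).foldl
      (fun d y => d.insert y (PySem.Int.floordiv ((totals.count y : Nat) : Int) c))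
      (PySem.Dict.empty : PySem.Dict Int Int)
    counts.items

-- ===== PORT B =====
-- dp over one list: dp = {0:1}; for v in nums: ndp rebuilt from dp.items()
def subsetDP (nums : List Int) : PySem.Dict Int Int :=
  nums.foldl (fun dp v =>
      dp.items.foldl (fun ndp p =>
          let n1 := ndp.insert p.1 (ndp.getD p.1 0 + p.2)
          n1.insert (p.1 + v) (n1.getD (p.1 + v) 0 + p.2))
        PySem.Dict.empty)
    (PySem.Dict.empty.insert 0 1)

-- sum(v for v in nums if v > 0)
def posSum (nums : List Int) : Int := nums.foldl (fun a v => a + (if 0 < v then v else 0)) 0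

def classify_by_edges_alt (cycle_lengths : List (List Int)) (c : Int) : List (Int × Int) :=
  let counter := cycle_lengths.foldl (fun cnt nums =>
      (subsetDP nums).items.foldl (fun cnt p => cnt.insert p.1 (cnt.getD p.1 0 + p.2)) cnt)
    (PySem.Dict.empty : PySem.Dict Int Int)
  match PySem.List.max? (cycle_lengths.map posSum) (fun y => y) with
  | none => []   -- Python: max of an empty generator raises ValueError; excluded by Pre_
  | some m =>
    -- the dict comprehension: its keys 0..m are distinct and inserted in this order
    (PySem.List.pyRange 0 (m + 1) 1).map (fun y => (y, PySem.Int.floordiv (counter.getD y 0) c))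

-- ===== PRECONDITION & SPEC =====
-- Pre_ excludes exactly the inputs on which the Python A raises: an empty cycle_lengths
-- (max([]) raises ValueError) and c = 0 (ZeroDivisionError).
def Pre_classify_by_edges (cycle_lengths : List (List Int)) (c : Int) : Prop :=
  cycle_lengths ≠ [] ∧ c ≠ 0
instance (cycle_lengths : List (List Int)) (c : Int) : Decidable (Pre_classify_by_edges cycle_lengths c) := by unfold Pre_classify_by_edges; infer_instance

def pvWitness_classify_by_edges : List (List Int) × Int := ([[1, 2], [-1, 3]], 2)

def Spec_classify_by_edges (cycle_lengths : List (List Int)) (c : Int) (out : List (Int × Int)) : Prop := out = classify_by_edges_alt cycle_lengths c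
instance (cycle_lengths : List (List Int)) (c : Int) (out : List (Int × Int)) : Decidable (Spec_classify_by_edges cycle_lengths c out) := by unfold Spec_classify_by_edges; infer_instance

-- ===== CLAIM (what is proved, stated in full; the proofs are below) =====
def Claim_equal_classify_by_edges : Prop := ∀ (cycle_lengths : List (List Int)) (c : Int), Dom_classify_by_edges cycle_lengths c → Pre_classify_by_edges cycle_lengths c → Spec_classify_by_edges cycle_lengths c (classify_by_edges cycle_lengths c)

-- ===== LEMMAS AND PROOFS =====

-- the positive-part sum as a mapped sum (the maximal subset sum of a list)
def posP (l : List Int) : Int := (l.map (fun v => if 0 < v then v else 0)).sum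
lemma posSum_eq (l : List Int) : posSum l = posP l := by
  simpa [posP] using PySem.List.foldl_add l (fun v => if 0 < v then v else 0) 0

lemma genComb_map (l : List Int) : ∀ curr, genComb l curr = (genComb l 0).map (fun u => curr + u) := by
  induction l with
  | nil => intro curr; simp [genComb]
  | cons v rest ih =>
    intro curr
    simp only [genComb]
    rw [ih (curr + v), ih curr, ih (0 + v)]
    simp [List.map_map, Function.comp_def, add_assoc]

lemma genComb_ne_nil (l : List Int) : genComb l 0 ≠ [] := by
  cases l with
  | nil => simp [genComb]
  | cons v rest =>
    simp only [genComb]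
    intro h
    exact genComb_ne_nil rest (List.append_eq_nil_iff.mp h).2

lemma count_genComb_shift (l : List Int) (curr t : Int) :
    (genComb l curr).count t = (genComb l 0).count (t - curr) := by
  rw [genComb_map l curr, show t = curr + (t - curr) by ring]
  simpa using List.count_map_of_injective (genComb l 0) (fun u => curr + u)
    (fun a b h => by dsimp at h; omega) (t - curr)

lemma count_genComb_snoc (l : List Int) : ∀ (v t : Int),
    (genComb (l ++ [v]) 0).count t = (genComb l 0).count t + (genComb l 0).count (t - v) := by
  induction l with
  | nil =>
    intro v t
    simp only [List.nil_append, genComb, List.count_append, List.count_singleton, beq_iff_eq]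
    split_ifs <;> omega
  | cons a l' ih =>
    intro v t
    simp only [List.cons_append, genComb, List.count_append]
    rw [count_genComb_shift (l' ++ [v]) (0 + a) t, ih v (t - (0 + a)), ih v t,
      count_genComb_shift l' (0 + a) t, count_genComb_shift l' (0 + a) (t - v)]
    have e1 : t - (0 + a) - v = t - v - (0 + a) := by ring
    rw [e1]; omega

lemma mem_genComb_le_posP (l : List Int) : ∀ s ∈ genComb l 0, s ≤ posP l := by
  induction l with
  | nil => intro s hs; simp [genComb] at hs; simp [posP, hs]
  | cons v rest ih =>
    intro s hs
    simp only [genComb, List.mem_append, genComb_map rest (0 + v), List.mem_map] at hs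
    have hP : posP (v :: rest) = (if 0 < v then v else 0) + posP rest := by simp [posP]
    rcases hs with ⟨u, hu, rfl⟩ | hs
    · have := ih u hu; rw [hP]; split_ifs <;> omega
    · have := ih s hs; rw [hP]; split_ifs <;> omega

lemma posP_mem_genComb (l : List Int) : posP l ∈ genComb l 0 := by
  induction l with
  | nil => simp [genComb, posP]
  | cons v rest ih =>
    have hP : posP (v :: rest) = (if 0 < v then v else 0) + posP rest := by simp [posP]
    simp only [genComb, List.mem_append, genComb_map rest (0 + v), List.mem_map]
    by_cases hv : 0 < v
    · exact Or.inl ⟨posP rest, ih, by rw [hP]; simp [hv]⟩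
    · right; rw [hP]; simpa [hv] using ih

lemma sum_map_ite_key (t : Int) (f : Int → Int) : ∀ (ks : List Int), ks.Nodup →
    (ks.map (fun k => if k = t then f k else 0)).sum = if t ∈ ks then f t else 0 := by
  intro ks
  induction ks with
  | nil => simp
  | cons a ks ih =>
    intro hnd
    simp only [List.map_cons, List.sum_cons, ih hnd.of_cons, List.mem_cons]
    by_cases ha : a = t
    · subst ha
      have : a ∉ ks := (List.nodup_cons.mp hnd).1
      simp [this]
    · simp [ha, Ne.symm ha]

lemma sum_items_ite (d : PySem.Dict Int Int) (hnd : d.keys.Nodup) (t : Int) :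
    (d.items.map (fun p => if p.1 = t then p.2 else 0)).sum = d.getD t 0 := by
  rw [PySem.Dict.items_eq_map_keys d hnd 0, List.map_map]
  have : ((fun p : Int × Int => if p.1 = t then p.2 else 0) ∘ fun k => (k, d.getD k 0))
      = fun k => if k = t then d.getD k 0 else 0 := by funext k; simp
  rw [this, sum_map_ite_key t _ d.keys hnd]
  split_ifs with h
  · rfl
  · rw [PySem.Dict.getD_of_not_contains d 0]
    rw [← Bool.not_eq_true]
    intro hc
    exact h ((PySem.Dict.contains_iff_mem_keys d t).mp hc)

lemma dp_inner_getD (v : Int) (L : List (Int × Int)) : ∀ (nd : PySem.Dict Int Int) (t : Int),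
    (L.foldl (fun ndp p =>
        let n1 := ndp.insert p.1 (ndp.getD p.1 0 + p.2)
        n1.insert (p.1 + v) (n1.getD (p.1 + v) 0 + p.2)) nd).getD t 0
      = nd.getD t 0 + (L.map (fun p => (if p.1 = t then p.2 else 0) + (if p.1 + v = t then p.2 else 0))).sum := by
  induction L with
  | nil => simp
  | cons p L ih =>
    intro nd t
    obtain ⟨s, k⟩ := p
    simp only [List.foldl_cons, List.map_cons, List.sum_cons, ih]
    have hstep : ∀ t', ((nd.insert s (nd.getD s 0 + k)).insert (s + v)
        (((nd.insert s (nd.getD s 0 + k)).getD (s + v) 0) + k)).getD t' 0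
        = nd.getD t' 0 + (if s = t' then k else 0) + (if s + v = t' then k else 0) := by
      intro t'
      simp only [PySem.Dict.getD_insert]
      by_cases h1 : t' = s + v <;> by_cases h2 : t' = s <;> by_cases h3 : s + v = s <;>
        simp_all <;> omega
    rw [hstep t]; ring

lemma dp_inner_nodup (v : Int) (L : List (Int × Int)) : ∀ (nd : PySem.Dict Int Int), nd.keys.Nodup →
    (L.foldl (fun ndp p =>
        let n1 := ndp.insert p.1 (ndp.getD p.1 0 + p.2)
        n1.insert (p.1 + v) (n1.getD (p.1 + v) 0 + p.2)) nd).keys.Nodup := by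
  induction L with
  | nil => intro nd h; simpa using h
  | cons p L ih =>
    intro nd h
    exact ih _ (PySem.Dict.nodup_keys_insert _ _ _ (PySem.Dict.nodup_keys_insert _ _ _ h))

lemma merge_getD (L : List (Int × Int)) : ∀ (cnt : PySem.Dict Int Int) (t : Int),
    (L.foldl (fun cnt p => cnt.insert p.1 (cnt.getD p.1 0 + p.2)) cnt).getD t 0
      = cnt.getD t 0 + (L.map (fun p => if p.1 = t then p.2 else 0)).sum := by
  induction L with
  | nil => simp
  | cons p L ih =>
    intro cnt t
    obtain ⟨s, k⟩ := p
    simp only [List.foldl_cons, List.map_cons, List.sum_cons, ih]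
    rw [PySem.Dict.getD_insert]
    by_cases h : t = s
    · subst h; simp; ring
    · have h2 : ¬s = t := fun e => h e.symm
      simp [h, h2]

lemma subsetDP_spec (nums : List Int) :
    (subsetDP nums).keys.Nodup ∧ ∀ t, (subsetDP nums).getD t 0 = ((genComb nums 0).count t : Int) := by
  induction nums using List.reverseRecOn with
  | nil =>
    constructor
    · exact PySem.Dict.nodup_keys_insert _ _ _ PySem.Dict.nodup_keys_empty
    · intro t
      by_cases h : t = 0
      · subst h; simp [subsetDP, genComb, PySem.Dict.getD_insert]
      · simp [subsetDP, genComb, PySem.Dict.getD_insert, h, Ne.symm h]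
  | append_singleton l v ih =>
    have hfold : subsetDP (l ++ [v]) =
        (subsetDP l).items.foldl (fun ndp p =>
          let n1 := ndp.insert p.1 (ndp.getD p.1 0 + p.2)
          n1.insert (p.1 + v) (n1.getD (p.1 + v) 0 + p.2)) PySem.Dict.empty := by
      simp [subsetDP, List.foldl_append]
    constructor
    · rw [hfold]; exact dp_inner_nodup v _ _ PySem.Dict.nodup_keys_empty
    · intro t
      rw [hfold, dp_inner_getD]
      have hsplit : (List.map (fun p : Int × Int => (if p.1 = t then p.2 else 0) + (if p.1 + v = t then p.2 else 0)) (subsetDP l).items).sum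
          = ((subsetDP l).items.map (fun p => if p.1 = t then p.2 else 0)).sum
            + ((subsetDP l).items.map (fun p => if p.1 = t - v then p.2 else 0)).sum := by
        rw [← List.sum_map_add]
        refine congrArg _ (List.map_congr_left fun p _ => ?_)
        have h : (p.1 + v = t) ↔ (p.1 = t - v) := by omega
        rw [if_congr h rfl rfl]
      rw [hsplit, sum_items_ite _ ih.1 t, sum_items_ite _ ih.1 (t - v), ih.2 t, ih.2 (t - v),
        count_genComb_snoc l v t]
      push_cast
      simp

lemma counter_getD (cl : List (List Int)) : ∀ (cnt : PySem.Dict Int Int) (t : Int),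
    (cl.foldl (fun cnt nums =>
        (subsetDP nums).items.foldl (fun cnt p => cnt.insert p.1 (cnt.getD p.1 0 + p.2)) cnt) cnt).getD t 0
      = cnt.getD t 0 + ((cl.map (fun nums => ((genComb nums 0).count t : Int))).sum) := by
  induction cl with
  | nil => simp
  | cons x cl ih =>
    intro cnt t
    simp only [List.foldl_cons, List.map_cons, List.sum_cons, ih]
    rw [merge_getD, sum_items_ite _ (subsetDP_spec x).1 t, (subsetDP_spec x).2 t]
    ring

lemma count_flatMap (cl : List (List Int)) (t : Int) :
    ((cl.flatMap (fun x => genComb x 0)).count t : Int) = (cl.map (fun nums => ((genComb nums 0).count t : Int))).sum := by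
  induction cl with
  | nil => simp
  | cons x cl ih =>
    simp only [List.flatMap_cons, List.count_append, List.map_cons, List.sum_cons, ← ih]
    push_cast
    ring

lemma flatMap_ne_nil (cl : List (List Int)) (h : cl ≠ []) :
    cl.flatMap (fun x => genComb x 0) ≠ [] := by
  cases cl with
  | nil => exact absurd rfl h
  | cons x cl =>
    simp only [List.flatMap_cons]
    intro he
    exact genComb_ne_nil x (List.append_eq_nil_iff.mp he).1

lemma max_eq (cl : List (List Int)) (h : cl ≠ []) :
    PySem.List.max? (cl.flatMap (fun x => genComb x 0)) (fun y => y)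
      = PySem.List.max? (cl.map posSum) (fun y => y) := by
  obtain ⟨ma, hma⟩ : ∃ ma, PySem.List.max? (cl.flatMap (fun x => genComb x 0)) (fun y => y) = some ma := by
    cases hx : PySem.List.max? (cl.flatMap (fun x => genComb x 0)) (fun y => y) with
    | none => exact absurd ((PySem.List.max?_eq_none_iff _ _).mp hx) (flatMap_ne_nil cl h)
    | some m => exact ⟨m, rfl⟩
  obtain ⟨mb, hmb⟩ : ∃ mb, PySem.List.max? (cl.map posSum) (fun y => y) = some mb := by
    cases hx : PySem.List.max? (cl.map posSum) (fun y => y) with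
    | none =>
      have := (PySem.List.max?_eq_none_iff _ _).mp hx
      simp only [List.map_eq_nil_iff] at this
      exact absurd this h
    | some m => exact ⟨m, rfl⟩
  rw [hma, hmb]
  have hA_mem := PySem.List.max?_mem hma
  have hA_max := PySem.List.max?_isMax hma
  have hB_mem := PySem.List.max?_mem hmb
  have hB_max := PySem.List.max?_isMax hmb
  have h1 : ma ≤ mb := by
    obtain ⟨x, hx, hmx⟩ := List.mem_flatMap.mp hA_mem
    have h2 : ma ≤ posP x := mem_genComb_le_posP x ma hmx
    have h3 : posSum x ≤ mb := hB_max (posSum x) (List.mem_map_of_mem hx)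
    rw [posSum_eq] at h3
    omega
  have h2 : mb ≤ ma := by
    obtain ⟨x, hx, rfl⟩ := List.mem_map.mp hB_mem
    have : posP x ∈ cl.flatMap (fun x => genComb x 0) :=
      List.mem_flatMap.mpr ⟨x, hx, posP_mem_genComb x⟩
    have := hA_max (posP x) this
    rw [posSum_eq]
    omega
  exact congrArg some (le_antisymm h1 h2)

lemma totals_eq (cl : List (List Int)) :
    cl.foldl (fun acc x => acc ++ generate_sums x) [] = cl.flatMap (fun x => genComb x 0) := by
  simpa [generate_sums] using PySem.List.foldl_append_eq_flatMap (fun x => genComb x 0) cl []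

lemma ports_agree (cl : List (List Int)) (c : Int) (hne : cl ≠ []) :
    classify_by_edges cl c = classify_by_edges_alt cl c := by
  simp only [classify_by_edges, classify_by_edges_alt]
  rw [totals_eq, max_eq cl hne]
  cases hm : PySem.List.max? (cl.map posSum) (fun y => y) with
  | none => rfl
  | some m =>
    dsimp only
    rw [PySem.Dict.items_foldl_insert_fresh (PySem.List.pyRange 0 (m + 1) 1) (fun y => y)
      (fun y => PySem.Int.floordiv (((cl.flatMap (fun x => genComb x 0)).count y : Nat) : Int) c)
      PySem.Dict.empty (by intro a _; simp) (by simpa using PySem.List.nodup_pyRange_one 0 (m + 1))]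
    simp only [show (PySem.Dict.empty : PySem.Dict Int Int).items = [] from rfl, List.nil_append]
    refine List.map_congr_left fun y _ => ?_
    rw [counter_getD, PySem.Dict.getD_empty, zero_add, ← count_flatMap]

-- ===== VERDICT (by name: the statement is the Claim_ definition above) =====
theorem classify_by_edges_spec : Claim_equal_classify_by_edges := by
  intro cycle_lengths c _ hpre
  unfold Spec_classify_by_edges
  exact ports_agree cycle_lengths c hpre.1
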